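-- pv_equiv track=rewrite | github.com/MrBrantCode/unitest_baseline | mut_generate/mist_train_taco/taco_5144/solution.py | can_magic_be_successful
-- ===== SOURCE A (Python) =====
-- def can_magic_be_successful(A: int, B: int, C: int, K: int) -> str:
--     for _ in range(K):
--         if A >= B:
--             B *= 2
--         elif B >= C:
--             C *= 2
--
--     if A < B < C:
--         return "Yes"
--     else:
--         return "No"
-- ===== SOURCE B (Python) =====
-- def _phase2(B, C, K):
--     # A already below B: only C can still double, needing (B//C).bit_length() steps
--     if B < C:
--         return "Yes"
--     if C <= 0:
--         return "No"
--     return "Yes" if (B // C).bit_length() <= K else "No"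
--
-- def can_magic_be_successful(A, B, C, K):
--     K = max(K, 0)
--     if A >= B:
--         if B <= 0:
--             return "No"
--         n1 = (A // B).bit_length()
--         if n1 > K:
--             return "No"
--         B *= 2 ** n1
--         K -= n1
--     return _phase2(B, C, K)
-- ===== Notes on version B (the rewrite author's own statement) =====
-- stated objective: faster
-- what changed: Replaces A's O(K) step-by-step doubling loop with a closed form: the number of doublings B (then C) needs is the bit_length of a floor quotient, with zero/negative stall cases decided directly.
import Mathlib
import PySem

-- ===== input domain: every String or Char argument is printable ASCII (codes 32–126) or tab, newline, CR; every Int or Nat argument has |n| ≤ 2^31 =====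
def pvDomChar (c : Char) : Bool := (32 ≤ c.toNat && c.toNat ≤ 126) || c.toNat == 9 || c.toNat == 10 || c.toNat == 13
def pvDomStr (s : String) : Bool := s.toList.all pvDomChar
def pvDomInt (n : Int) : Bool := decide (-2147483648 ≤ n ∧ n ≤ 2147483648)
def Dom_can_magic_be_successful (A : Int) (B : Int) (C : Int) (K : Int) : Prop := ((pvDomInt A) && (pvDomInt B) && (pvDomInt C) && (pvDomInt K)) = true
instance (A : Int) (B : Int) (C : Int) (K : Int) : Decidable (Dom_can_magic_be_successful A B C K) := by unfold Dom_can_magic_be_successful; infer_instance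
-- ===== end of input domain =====

-- B replaces A's O(K) doubling loop by an O(1) closed form: the number of doublings each
-- of B and C needs is a bit_length of a floor quotient (objective: faster, asymptotic).

-- ===== PORT A =====
-- one iteration of A's loop body on the mutable pair (B, C)
def pvStep (A : Int) (bc : Int × Int) : Int × Int :=
  if bc.1 ≤ A then (bc.1 * 2, bc.2)
  else if bc.2 ≤ bc.1 then (bc.1, bc.2 * 2)
  else bc

-- 'for _ in range(K)' : K.toNat iterations (range of a negative K is empty)
def pvLoop (A : Int) : Nat → Int × Int → Int × Int
  | 0, bc => bc
  | k+1, bc => pvLoop A k (pvStep A bc)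

def can_magic_be_successful (A : Int) (B : Int) (C : Int) (K : Int) : String :=
  if A < (pvLoop A K.toNat (B, C)).1 ∧ (pvLoop A K.toNat (B, C)).1 < (pvLoop A K.toNat (B, C)).2
  then "Yes" else "No"

-- ===== PORT B =====
-- Source B's _phase2: A is already strictly below B; only C may still need doubling
def pvPhase2 (B : Int) (C : Int) (K : Int) : String :=
  if B < C then "Yes"
  else if C ≤ 0 then "No"
  else if (PySem.Int.bitLength (PySem.Int.floordiv B C) : Int) ≤ K then "Yes" else "No"

-- 'K = max(K, 0)' is inlined as 'max K 0'; n1 = (A // B).bit_length()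
def can_magic_be_successful_alt (A : Int) (B : Int) (C : Int) (K : Int) : String :=
  if B ≤ A then
    if B ≤ 0 then "No"
    else
      if (PySem.Int.bitLength (PySem.Int.floordiv A B) : Int) > max K 0 then "No"
      else pvPhase2 (B * 2 ^ PySem.Int.bitLength (PySem.Int.floordiv A B)) C
             (max K 0 - PySem.Int.bitLength (PySem.Int.floordiv A B))
  else pvPhase2 B C (max K 0)

-- ===== PRECONDITION & SPEC =====
def Spec_can_magic_be_successful (A : Int) (B : Int) (C : Int) (K : Int) (out : String) : Prop := out = can_magic_be_successful_alt A B C K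
instance (A : Int) (B : Int) (C : Int) (K : Int) (out : String) : Decidable (Spec_can_magic_be_successful A B C K out) := by unfold Spec_can_magic_be_successful; infer_instance

-- ===== CLAIM (what is proved, stated in full; the proofs are below) =====
def Claim_equal_can_magic_be_successful : Prop := ∀ (A : Int) (B : Int) (C : Int) (K : Int), Dom_can_magic_be_successful A B C K → Spec_can_magic_be_successful A B C K (can_magic_be_successful A B C K)

-- ===== LEMMAS AND PROOFS =====

-- bit_length bracket: for 0 < q, bitLength q ≤ i ↔ q < 2^i
theorem pv_bl_le_iff (q : Int) (hq : 0 < q) (i : Nat) :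
    PySem.Int.bitLength q ≤ i ↔ q < (2 : Int) ^ i := by
  have habs : (q.natAbs : Int) = q := Int.natAbs_of_nonneg (le_of_lt hq)
  have hcast : (((2:Nat) ^ i : Nat) : Int) = (2 : Int) ^ i := by push_cast; ring
  constructor
  · intro h
    have h1 : q.natAbs < 2 ^ i :=
      lt_of_lt_of_le (PySem.Int.lt_two_pow_bitLength q) (Nat.pow_le_pow_right (by norm_num) h)
    have h2 : (q.natAbs : Int) < (((2:Nat) ^ i : Nat) : Int) := by exact_mod_cast h1
    rw [habs, hcast] at h2
    exact h2
  · intro h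
    by_contra hc
    push_neg at hc
    have hne : q ≠ 0 := by omega
    have h2 : 2 ^ (PySem.Int.bitLength q - 1) ≤ q.natAbs := PySem.Int.two_pow_bitLength_le q hne
    have h3 : 2 ^ i ≤ 2 ^ (PySem.Int.bitLength q - 1) :=
      Nat.pow_le_pow_right (by norm_num) (by omega)
    have h4 : (((2:Nat) ^ i : Nat) : Int) ≤ (q.natAbs : Int) := by exact_mod_cast le_trans h3 h2
    rw [habs, hcast] at h4
    omega

-- combined bracket: for 0 < b ≤ a, bitLength (a // b) ≤ i ↔ a < b * 2^i
theorem pv_bl_div_le_iff (a b : Int) (hb : 0 < b) (hba : b ≤ a) (i : Nat) :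
    PySem.Int.bitLength (PySem.Int.floordiv a b) ≤ i ↔ a < b * (2 : Int) ^ i := by
  have hq : 0 < PySem.Int.floordiv a b := by
    have := (PySem.Int.le_floordiv_iff_mul_le (a := a) (b := b) (q := 1) hb).mpr (by linarith)
    omega
  rw [pv_bl_le_iff _ hq i, PySem.Int.floordiv_lt_iff_lt_mul hb, mul_comm]

-- A's loop when B ≤ 0 and B ≤ A: the first branch fires forever, B never overtakes A
theorem pv_loop_stallB (A : Int) : ∀ (k : Nat) (B C : Int), B ≤ A → B ≤ 0 →
    pvLoop A k (B, C) = (B * 2 ^ k, C) ∧ B * 2 ^ k ≤ A := by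
  intro k
  induction k with
  | zero => intro B C h1 h2; exact ⟨by simp [pvLoop], by simpa using h1⟩
  | succ k ih =>
    intro B C h1 h2
    have hstep : pvStep A (B, C) = (B * 2, C) := by simp [pvStep, h1]
    have := ih (B * 2) C (by omega) (by omega)
    refine ⟨?_, ?_⟩
    · show pvLoop A k (pvStep A (B, C)) = _
      rw [hstep, this.1]; ring_nf
    · calc B * 2 ^ (k+1) = B * 2 * 2 ^ k := by ring
        _ ≤ A := this.2

-- A's loop while B keeps doubling: if k steps do not lift B above A, all k steps double B
theorem pv_loop_M1 (A : Int) : ∀ (k : Nat) (B C : Int), 0 < B → ¬ (A < B * 2 ^ k) →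
    pvLoop A k (B, C) = (B * 2 ^ k, C) := by
  intro k
  induction k with
  | zero => intro B C _ _; simp [pvLoop]
  | succ k ih =>
    intro B C hB h
    push_neg at h
    have hpk : (0:Int) < 2 ^ k := by positivity
    have h2k : (1:Int) ≤ 2 ^ k := by omega
    have h' : B * 2 * 2 ^ k ≤ A := by
      rw [show B * 2 * 2 ^ k = B * 2 ^ (k + 1) from by ring]; exact h
    have hm : B * 2 ^ k ≤ A := by nlinarith [mul_pos hB hpk]
    have hB2k : B ≤ B * 2 ^ k := le_mul_of_one_le_right (le_of_lt hB) h2k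
    have hBA : B ≤ A := by linarith
    have hstep : pvStep A (B, C) = (B * 2, C) := by simp [pvStep, hBA]
    show pvLoop A k (pvStep A (B, C)) = _
    rw [hstep, ih (B * 2) C (by omega) (not_lt.mpr h')]
    ring_nf

-- A's loop: the first n steps double B as long as each intermediate B stays ≤ A
theorem pv_loop_M2 (A : Int) : ∀ (n k : Nat) (B C : Int), 0 < B →
    (∀ i, i < n → B * 2 ^ i ≤ A) →
    pvLoop A (n + k) (B, C) = pvLoop A k (B * 2 ^ n, C) := by
  intro n
  induction n with
  | zero => intro k B C _ _; simp
  | succ n ih =>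
    intro k B C hB hstay
    have hBA : B ≤ A := by have := hstay 0 (by omega); simpa using this
    have hstep : pvStep A (B, C) = (B * 2, C) := by simp [pvStep, hBA]
    have h1 : n + 1 + k = (n + k) + 1 := by omega
    rw [h1]
    show pvLoop A (n + k) (pvStep A (B, C)) = _
    rw [hstep, ih k (B * 2) C (by omega) (by
      intro i hi
      have := hstay (i + 1) (by omega)
      calc B * 2 * 2 ^ i = B * 2 ^ (i + 1) := by ring
        _ ≤ A := this)]
    congr 2
    ring

-- phase 2, already successful: A < B < C, the loop does nothing
theorem pv_loop_noop (A : Int) : ∀ (k : Nat) (B C : Int), A < B → B < C →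
    pvLoop A k (B, C) = (B, C) := by
  intro k
  induction k with
  | zero => intro B C _ _; rfl
  | succ k ih =>
    intro B C h1 h2
    have hstep : pvStep A (B, C) = (B, C) := by
      simp only [pvStep]; rw [if_neg (by omega), if_neg (by omega)]
    show pvLoop A k (pvStep A (B, C)) = _
    rw [hstep, ih B C h1 h2]

-- phase 2 with C ≤ 0: C doubles forever but never overtakes B
theorem pv_loop_stallC (A : Int) : ∀ (k : Nat) (B C : Int), A < B → C ≤ B → C ≤ 0 →
    pvLoop A k (B, C) = (B, C * 2 ^ k) ∧ C * 2 ^ k ≤ B := by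
  intro k
  induction k with
  | zero => intro B C _ h2 _; exact ⟨by simp [pvLoop], by simpa using h2⟩
  | succ k ih =>
    intro B C h1 h2 h3
    have hstep : pvStep A (B, C) = (B, C * 2) := by
      simp only [pvStep]; rw [if_neg (by omega), if_pos (by omega)]
    have := ih B (C * 2) h1 (by omega) (by omega)
    refine ⟨?_, ?_⟩
    · show pvLoop A k (pvStep A (B, C)) = _
      rw [hstep, this.1]; ring_nf
    · calc C * 2 ^ (k + 1) = C * 2 * 2 ^ k := by ring
        _ ≤ B := this.2

-- phase 2 with 0 < C: B stays fixed, and C overtakes B within k steps iff C * 2^k would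
theorem pv_loop_phaseC (A B : Int) : ∀ (k : Nat) (C : Int), A < B → 0 < C →
    (pvLoop A k (B, C)).1 = B ∧ (B < (pvLoop A k (B, C)).2 ↔ B < C * 2 ^ k) := by
  intro k
  induction k with
  | zero => intro C h1 h2; simp [pvLoop]
  | succ k ih =>
    intro C h1 h2
    by_cases hCB : C ≤ B
    · have hstep : pvStep A (B, C) = (B, C * 2) := by
        simp only [pvStep]; rw [if_neg (by omega), if_pos (by omega)]
      have := ih (C * 2) h1 (by omega)
      refine ⟨?_, ?_⟩
      · show (pvLoop A k (pvStep A (B, C))).1 = B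
        rw [hstep]; exact this.1
      · show B < (pvLoop A k (pvStep A (B, C))).2 ↔ _
        rw [hstep, this.2, show C * 2 * 2 ^ k = C * 2 ^ (k + 1) from by ring]
    · have hstep : pvStep A (B, C) = (B, C) := by
        simp only [pvStep]; rw [if_neg (by omega), if_neg (by omega)]
      have := ih C h1 h2
      have h2k : (1:Int) ≤ 2 ^ k := one_le_pow₀ (by norm_num)
      have h2k1 : (1:Int) ≤ 2 ^ (k + 1) := one_le_pow₀ (by norm_num)
      refine ⟨?_, ?_⟩
      · show (pvLoop A k (pvStep A (B, C))).1 = B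
        rw [hstep]; exact this.1
      · show B < (pvLoop A k (pvStep A (B, C))).2 ↔ _
        rw [hstep, this.2]
        constructor <;> intro _ <;> nlinarith

-- phase 2 of A's loop (A already strictly below B) equals Source B's closed-form _phase2
theorem pv_phase2_correct (A B C : Int) (k : Nat) (hAB : A < B) :
    (if A < (pvLoop A k (B, C)).1 ∧ (pvLoop A k (B, C)).1 < (pvLoop A k (B, C)).2 then "Yes" else "No")
      = pvPhase2 B C (k : Int) := by
  unfold pvPhase2
  by_cases hBC : B < C
  · rw [pv_loop_noop A k B C hAB hBC]
    simp [hAB, hBC]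
  · push_neg at hBC
    by_cases hC0 : C ≤ 0
    · have h := pv_loop_stallC A k B C hAB hBC hC0
      rw [h.1]
      have h2 := h.2
      rw [if_neg (by omega : ¬ B < C), if_pos hC0, if_neg (by simp; omega)]
    · push_neg at hC0
      have h := pv_loop_phaseC A B k C hAB hC0
      have hbl := pv_bl_div_le_iff B C hC0 hBC k
      have hcast : ((PySem.Int.bitLength (PySem.Int.floordiv B C) : Nat) : Int) ≤ (k : Int)
          ↔ PySem.Int.bitLength (PySem.Int.floordiv B C) ≤ k := by exact_mod_cast Iff.rfl
      rw [if_neg (by omega : ¬ B < C), if_neg (by omega : ¬ C ≤ 0)]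
      by_cases hwin : B < C * 2 ^ k
      · rw [if_pos (hcast.mpr (hbl.mpr hwin)), if_pos ⟨by omega, by rw [h.1, h.2]; exact hwin⟩]
      · rw [if_neg (fun hc => hwin (hbl.mp (hcast.mp hc))),
           if_neg (by rw [h.1, h.2]; tauto)]

-- ===== VERDICT (by name: the statement is the Claim_ definition above) =====
theorem can_magic_be_successful_spec : Claim_equal_can_magic_be_successful := by
  unfold Claim_equal_can_magic_be_successful Spec_can_magic_be_successful
  intro A B C K _
  unfold can_magic_be_successful can_magic_be_successful_alt
  have hKmax : ((K.toNat : Int)) = max K 0 := Int.toNat_eq_max K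
  set k : Nat := K.toNat with hk
  by_cases hAB : B ≤ A
  · rw [if_pos hAB]
    by_cases hB0 : B ≤ 0
    · rw [if_pos hB0]
      have h := pv_loop_stallB A k B C hAB hB0
      rw [h.1, if_neg (by simp; omega)]
    · push_neg at hB0
      rw [if_neg (by omega : ¬ B ≤ 0)]
      have hbl := pv_bl_div_le_iff A B hB0 hAB
      set n1 := PySem.Int.bitLength (PySem.Int.floordiv A B) with hn1
      by_cases hK : (n1 : Int) > max K 0
      · rw [if_pos hK]
        have hkn : ¬ n1 ≤ k := by omega
        have hno : ¬ (A < B * 2 ^ k) := fun hc => hkn ((hbl k).mpr hc)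
        rw [pv_loop_M1 A k B C hB0 hno, if_neg (by simp; omega)]
      · rw [if_neg hK]
        have hkn : n1 ≤ k := by omega
        have hstay : ∀ i, i < n1 → B * 2 ^ i ≤ A := by
          intro i hi
          by_contra hc
          exact absurd ((hbl i).mpr (by omega)) (by omega)
        have hA1 : A < B * 2 ^ n1 := (hbl n1).mp le_rfl
        have hsplit : k = n1 + (k - n1) := by omega
        rw [hsplit, pv_loop_M2 A n1 (k - n1) B C hB0 hstay,
           pv_phase2_correct A (B * 2 ^ n1) C (k - n1) hA1,
           show ((k - n1 : Nat) : Int) = max K 0 - (n1 : Int) from by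
             rw [Nat.cast_sub hkn, hKmax]]
  · push_neg at hAB
    rw [if_neg (by omega : ¬ B ≤ A), pv_phase2_correct A B C k hAB, hKmax]
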